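-- pv_equiv track=rewrite | github.com/jesusyoshi54/C-to-RM-base | tools/TE_encode.py | FindEnd
-- ===== SOURCE A (Python) =====
-- def FindEnd(string):
-- 	cnt=0
-- 	x=0
-- 	start=0
-- 	if '[' not in string:
-- 		return None
-- 	for c in string:
-- 		if '[' in c:
-- 			cnt+=1
-- 			start=1
-- 		if ']' in c:
-- 			cnt-=1
-- 		if cnt==0 and start:
-- 			break
-- 		x+=1
-- 	return x
-- ===== SOURCE B (Python) =====
-- def FindEnd(string):
--     if '[' not in string:
--         return None
--     bal = []
--     b = 0
--     for c in string:
--         b += (c == '[') - (c == ']')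
--         bal.append(b)
--     first = string.index('[')
--     for i, v in enumerate(bal[first:], first):
--         if v == 0:
--             return i
--     return len(string)
-- ===== Notes on version B (the rewrite author's own statement) =====
-- stated objective: alternative
-- what changed: Replaces A's single stateful scan (counter + start flag + break) with two separate passes: precompute the full cumulative bracket-balance table, then search it from the position of the first opening bracket for the first zero entry.
import Mathlib
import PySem

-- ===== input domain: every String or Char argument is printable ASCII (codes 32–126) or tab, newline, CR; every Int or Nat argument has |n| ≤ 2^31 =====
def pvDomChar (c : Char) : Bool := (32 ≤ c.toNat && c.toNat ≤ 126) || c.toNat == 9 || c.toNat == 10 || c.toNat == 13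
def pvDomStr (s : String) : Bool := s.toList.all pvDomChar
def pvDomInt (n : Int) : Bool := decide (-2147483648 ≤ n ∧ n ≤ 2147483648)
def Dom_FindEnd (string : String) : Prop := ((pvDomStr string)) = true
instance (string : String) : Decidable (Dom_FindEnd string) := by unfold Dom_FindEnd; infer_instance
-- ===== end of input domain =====

-- ===== PORT A =====
-- A's loop with break: cnt counter, start flag, x index; '[' in c for a single char c is c = '['
def FindEndLoop : List Char → Int → Int → Int → Int
  | [], _, x, _ => x
  | c :: rest, cnt, x, start =>
    let cnt1 := if c = '[' then cnt + 1 else cnt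
    let start1 := if c = '[' then 1 else start
    let cnt2 := if c = ']' then cnt1 - 1 else cnt1
    if cnt2 = 0 ∧ start1 ≠ 0 then x else FindEndLoop rest cnt2 (x + 1) start1

-- '[' not in string, for the 1-char needle, is exactly list non-membership
def FindEnd (string : String) : Option Int :=
  if '[' ∈ string.toList then some (FindEndLoop string.toList 0 0 0) else none

-- ===== PORT B =====
-- B: balance-table pass (b += (c=='[') - (c==']'))
def BalTable : List Char → Int → List Int
  | [], _ => []
  | c :: rest, b =>
    let b1 := b + (if c = '[' then 1 else 0) - (if c = ']' then 1 else 0)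
    b1 :: BalTable rest b1

-- B: search pass over enumerate(bal[first:], first)
def SearchZero : List Int → Int → Int
  | [], i => i
  | v :: rest, i => if v = 0 then i else SearchZero rest (i + 1)

-- string.index('[') never raises under the guard; ported as List.idxOf
def FindEnd_alt (string : String) : Option Int :=
  let cs := string.toList
  if '[' ∈ cs then
    let bal := BalTable cs 0
    let first := cs.idxOf '['
    some (SearchZero (bal.drop first) (first : Int))
  else none

-- ===== PRECONDITION & SPEC =====
def Spec_FindEnd (string : String) (out : Option Int) : Prop := out = FindEnd_alt string
instance (string : String) (out : Option Int) : Decidable (Spec_FindEnd string out) := by unfold Spec_FindEnd; infer_instance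

-- ===== CLAIM (what is proved, stated in full; the proofs are below) =====
def Claim_equal_FindEnd : Prop := ∀ (string : String), Dom_FindEnd string → Spec_FindEnd string (FindEnd string)

-- ===== LEMMAS AND PROOFS =====

-- ===== VERDICT (by name: the statement is the Claim_ definition above) =====
-- once start = 1, A's loop returns the first index (counting from x) where the running balance hits 0
theorem loop_started (cs : List Char) : ∀ (cnt x : Int),
    FindEndLoop cs cnt x 1 = SearchZero (BalTable cs cnt) x := by
  induction cs with
  | nil => intro cnt x; rfl
  | cons c rest ih =>
    intro cnt x
    simp only [FindEndLoop, BalTable, SearchZero]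
    by_cases hc : c = '['
    · by_cases hz : cnt + 1 = 0 <;> simp [hc, hz, ih]
    · by_cases hr : c = ']'
      · by_cases hz : cnt - 1 = 0 <;> simp [hr, hz, ih]
      · by_cases hz : cnt = 0 <;> simp [hc, hr, hz, ih]

-- before the first '[', A's start flag is 0 and the loop never breaks
theorem loop_unstarted (cs : List Char) : ∀ (cnt x : Int), '[' ∈ cs →
    FindEndLoop cs cnt x 0 =
      SearchZero ((BalTable cs cnt).drop (cs.idxOf '[')) (x + (cs.idxOf '[' : Int)) := by
  induction cs with
  | nil => intro _ _ h; exact absurd h (List.not_mem_nil)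
  | cons c rest ih =>
    intro cnt x hmem
    by_cases hc : c = '['
    · subst hc
      simp only [List.idxOf_cons_self, List.drop_zero, Int.natCast_zero, add_zero]
      show FindEndLoop ('[' :: rest) cnt x 0 = SearchZero (BalTable ('[' :: rest) cnt) x
      simp only [FindEndLoop, BalTable, SearchZero]
      by_cases hz : cnt + 1 = 0 <;> simp [hz, loop_started]
    · have hmem' : '[' ∈ rest := by
        rcases List.mem_cons.mp hmem with h0 | h0
        · exact absurd h0.symm hc
        · exact h0
      have hidx : (c :: rest).idxOf '[' = rest.idxOf '[' + 1 := by
        simp [hc]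
      rw [hidx]
      have hδ : (cnt + 0 - if c = ']' then (1 : Int) else 0)
          = (if c = ']' then cnt - 1 else cnt) := by
        by_cases h2 : c = ']' <;> simp [h2]
      simp only [FindEndLoop, BalTable, if_neg hc, List.drop_succ_cons, Nat.cast_add,
        Nat.cast_one]
      rw [if_neg (by simp), hδ, ih _ (x + 1) hmem']
      ring_nf

theorem FindEnd_spec : Claim_equal_FindEnd := by
  intro s _
  unfold Spec_FindEnd FindEnd FindEnd_alt
  by_cases h : '[' ∈ s.toList
  · simp only [h, if_pos]
    have := loop_unstarted s.toList 0 0 h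
    simp only [zero_add] at this
    simp [this]
  · simp [h]
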